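-- pv_equiv track=rewrite | github.com/Slash0BZ/speaker-identification | code/extraction/run_coref_gutenberg.py | get_arg0_index
-- ===== SOURCE A (Python) =====
-- def get_arg0_index(tags):
--     start = -1
--     end = -1
--     for i, t in enumerate(tags):
--         if t == "B-ARG0":
--             start = i
--             end = i
--             for j in range(i + 1, len(tags)):
--                 if "ARG0" in tags[j]:
--                     end = j
--                 else:
--                     break
--     return start, end
-- ===== SOURCE B (Python) =====
-- def get_arg0_index(tags):
--     n = len(tags)
--     start = -1
--     for i in range(n - 1, -1, -1):
--         if tags[i] == "B-ARG0":
--             start = i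
--             break
--     if start == -1:
--         return -1, -1
--     end = start
--     j = start + 1
--     while j < n and "ARG0" in tags[j]:
--         end = j
--         j += 1
--     return start, end
-- ===== Notes on version B (the rewrite author's own statement) =====
-- stated objective: simpler
-- what changed: Replaces A's forward scan that re-extends at every B-ARG0 (nested loops) with a single reverse scan that finds the last B-ARG0 and one forward extension from it.
import Mathlib
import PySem

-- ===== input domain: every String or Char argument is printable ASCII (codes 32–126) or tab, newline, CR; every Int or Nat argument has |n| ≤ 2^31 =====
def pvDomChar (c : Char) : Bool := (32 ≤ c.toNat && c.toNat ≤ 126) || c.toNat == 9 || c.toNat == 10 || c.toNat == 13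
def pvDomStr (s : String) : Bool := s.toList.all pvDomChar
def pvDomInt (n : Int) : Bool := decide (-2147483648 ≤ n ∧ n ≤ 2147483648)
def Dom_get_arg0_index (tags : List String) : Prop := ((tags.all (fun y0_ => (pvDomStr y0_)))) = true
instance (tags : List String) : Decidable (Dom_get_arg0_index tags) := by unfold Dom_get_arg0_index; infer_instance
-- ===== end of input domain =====

-- B replaces A's forward scan with a nested re-extension at every B-ARG0 by a single
-- reverse scan for the last B-ARG0 plus one forward extension (simpler, no redundant work).

-- ===== PORT A =====
-- inner 'for j in range(i+1, len(tags)): if "ARG0" in tags[j]: end = j else: break'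
def pvAExtend (tags : List String) (e : Int) (js : List Int) : Int :=
  match js with
  | [] => e
  | j :: rest =>
      if PySem.Str.isIn "ARG0" (PySem.List.pyGetD tags j "") then pvAExtend tags j rest
      else e

def get_arg0_index (tags : List String) : Int × Int :=
  (PySem.List.enumerate tags 0).foldl
    (fun (se : Int × Int) (p : Int × String) =>
      if p.2 == "B-ARG0" then
        (p.1, pvAExtend tags p.1 (PySem.List.pyRange (p.1 + 1) (PySem.List.len tags) 1))
      else se)
    (-1, -1)

-- ===== PORT B =====
-- 'for i in range(n-1, -1, -1): if tags[i] == "B-ARG0": start = i; break'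
def pvBFind (tags : List String) (is_ : List Int) : Int :=
  match is_ with
  | [] => -1
  | i :: rest => if PySem.List.pyGetD tags i "" == "B-ARG0" then i else pvBFind tags rest

-- 'while j < n and "ARG0" in tags[j]: end = j; j += 1'
def pvBWhile (tags : List String) (n e j : Int) : Int :=
  if h : j < n ∧ PySem.Str.isIn "ARG0" (PySem.List.pyGetD tags j "") then
    pvBWhile tags n j (j + 1)
  else e
termination_by (n - j).toNat
decreasing_by omega

def get_arg0_index_alt (tags : List String) : Int × Int :=
  let n : Int := PySem.List.len tags
  let start := pvBFind tags (PySem.List.pyRange (n - 1) (-1) (-1))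
  if start == -1 then (-1, -1)
  else (start, pvBWhile tags n start (start + 1))

-- ===== PRECONDITION & SPEC =====
def Spec_get_arg0_index (tags : List String) (out : Int × Int) : Prop := out = get_arg0_index_alt tags
instance (tags : List String) (out : Int × Int) : Decidable (Spec_get_arg0_index tags out) := by unfold Spec_get_arg0_index; infer_instance

-- ===== CLAIM (what is proved, stated in full; the proofs are below) =====
def Claim_equal_get_arg0_index : Prop := ∀ (tags : List String), Dom_get_arg0_index tags → Spec_get_arg0_index tags (get_arg0_index tags)

-- ===== LEMMAS AND PROOFS =====

-- the inner extension of A equals B's while loop, for any start point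
theorem pvExtend_eq_while (tags : List String) (n : Int) (e j : Int) :
    pvAExtend tags e (PySem.List.pyRange j n 1) = pvBWhile tags n e j := by
  by_cases hj : j < n
  · rw [PySem.List.pyRange_one_cons hj]
    rw [pvAExtend, pvBWhile]
    by_cases hin : PySem.Str.isIn "ARG0" (PySem.List.pyGetD tags j "")
    · rw [if_pos hin, dif_pos ⟨hj, hin⟩]
      exact pvExtend_eq_while tags n j (j + 1)
    · rw [if_neg hin, dif_neg (by tauto)]
  · rw [PySem.List.pyRange_one_eq_nil (by omega)]
    rw [pvAExtend, pvBWhile, dif_neg (by tauto)]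
termination_by (n - j).toNat
decreasing_by omega

-- A's fold only remembers the last pair whose tag is "B-ARG0"
theorem pvFold_char (tags : List String) (ps : List (Int × String)) (s : Int × Int) :
    ps.foldl
      (fun (se : Int × Int) (p : Int × String) =>
        if p.2 == "B-ARG0" then
          (p.1, pvAExtend tags p.1 (PySem.List.pyRange (p.1 + 1) (PySem.List.len tags) 1))
        else se) s
    = match (ps.filter (fun p => p.2 == "B-ARG0")).getLast? with
      | none => s
      | some p => (p.1, pvAExtend tags p.1 (PySem.List.pyRange (p.1 + 1) (PySem.List.len tags) 1)) := by
  induction ps using List.reverseRecOn generalizing s with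
  | nil => simp
  | append_singleton qs q ih =>
      rw [List.foldl_append, List.foldl_cons, List.foldl_nil, List.filter_append]
      by_cases hq : (q.2 == "B-ARG0") = true
      · rw [if_pos hq]
        simp [hq]
      · rw [if_neg hq]
        have hf : List.filter (fun p => p.2 == "B-ARG0") [q] = [] := by
          simp [hq]
        rw [hf, List.append_nil]
        exact ih s

-- B's find loop is List.find? with default -1
theorem pvBFind_eq_find? (tags : List String) (is_ : List Int) :
    pvBFind tags is_ =
      ((is_.find? (fun i => PySem.List.pyGetD tags i "" == "B-ARG0")).getD (-1)) := by
  induction is_ with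
  | nil => rfl
  | cons i rest ih =>
      rw [pvBFind]
      by_cases h : (PySem.List.pyGetD tags i "" == "B-ARG0") = true
      · rw [if_pos h, List.find?_cons_of_pos (p := fun i => PySem.List.pyGetD tags i "" == "B-ARG0") h]
        rfl
      · rw [if_neg h, List.find?_cons_of_neg (p := fun i => PySem.List.pyGetD tags i "" == "B-ARG0") h]
        exact ih

-- first match in the reversed list = last match in the list
theorem find?_reverse_eq_getLast?_filter {α : Type} (l : List α) (p : α → Bool) :
    l.reverse.find? p = (l.filter p).getLast? := by
  induction l using List.reverseRecOn with
  | nil => rfl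
  | append_singleton qs q ih =>
      rw [List.reverse_append, List.filter_append, List.reverse_singleton,
        List.singleton_append]
      by_cases hq : p q
      · rw [List.find?_cons_of_pos hq]
        have hf : List.filter p [q] = [q] := by simp [hq]
        rw [hf, List.getLast?_concat]
      · rw [List.find?_cons_of_neg hq]
        have hf : List.filter p [q] = [] := by simp [hq]
        rw [hf, List.append_nil, ih]

-- range(n-1, -1, -1) is the reverse of range(0, n, 1)
theorem pyRange_down_eq_reverse (n : Int) (hn : 0 ≤ n) :
    PySem.List.pyRange (n - 1) (-1) (-1) = (PySem.List.pyRange 0 n 1).reverse := by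
  rw [PySem.List.pyRange_neg_one, PySem.List.pyRange_one]
  apply List.ext_getElem
  · simp only [List.length_map, List.length_range, List.length_reverse]
    omega
  · intro k h1 h2
    simp only [List.length_map, List.length_range, List.length_reverse] at h1 h2
    rw [List.getElem_reverse]
    simp only [List.getElem_map, List.getElem_range, List.length_map, List.length_range]
    omega

theorem get_arg0_index_eq (tags : List String) :
    get_arg0_index tags = get_arg0_index_alt tags := by
  unfold get_arg0_index get_arg0_index_alt
  dsimp only
  rw [pvFold_char, pvBFind_eq_find?,
      pyRange_down_eq_reverse (PySem.List.len tags) (Int.natCast_nonneg tags.length),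
      find?_reverse_eq_getLast?_filter,
      PySem.List.enumerate_eq_map_pyRange tags "", List.filter_map, List.getLast?_map]
  have hpred : ((fun (p : Int × String) => p.2 == "B-ARG0") ∘
      (fun j => (j, PySem.List.pyGetD tags j ""))) =
      (fun i => PySem.List.pyGetD tags i "" == "B-ARG0") := rfl
  rw [hpred]
  cases hlast : ((PySem.List.pyRange 0 (PySem.List.len tags) 1).filter
      (fun i => PySem.List.pyGetD tags i "" == "B-ARG0")).getLast? with
  | none => simp
  | some i =>
      have hi0 : 0 ≤ i := by
        have hmem := List.mem_of_getLast? hlast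
        have hmem' := List.mem_of_mem_filter hmem
        rw [PySem.List.mem_pyRange_one] at hmem'
        omega
      have hne : (i == (-1 : Int)) = false := by
        simp only [beq_eq_false_iff_ne, ne_eq]
        omega
      simp only [Option.map_some, Option.getD_some, hne, Bool.false_eq_true, if_false]
      rw [pvExtend_eq_while]

-- ===== VERDICT (by name: the statement is the Claim_ definition above) =====
theorem get_arg0_index_spec : Claim_equal_get_arg0_index := by
  intro tags _
  unfold Spec_get_arg0_index
  exact get_arg0_index_eq tags
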